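-- pv_equiv track=rewrite | github.com/juju0111/Data-Structures-and-Algorithms-Specialization | Algorithmic Toolbox/week5/edit_distance.py | output_alignment
-- ===== SOURCE A (Python) =====
-- def back_track(D,i,j):
--     k = i-1
--     l = j-1
--     if k < 0:
--         k = 0
--     if l < 0:
--         l = 0
--
--     arr = [D[k,l], D[i,l] , D[k,j]]
--     min_val = 100
--     min_idx = 0
--     for m in range(len(arr)):
--         if arr[m] < min_val:
--             min_val = arr[m]
--             min_idx = m
--     if min_idx == 0:
--         return k,l
--     elif min_idx == 2:
--         return k,j
--     else:
--         return i,l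
--
-- def output_alignment(D,i,j,s,t,cost):
--     k = i-1
--     l = j-1
--     if i-1 <0:
--         k = 0
--     if j-1 <0:
--         l = 0
--
--     if i == 0 and j==0:
--         return cost
--     if back_track(D,i,j) == (k,j):
--         i=k
--         cost += 1
--         return output_alignment(D,i,j,s,t,cost)
--     elif back_track(D,i,j) == (i,l):
--
--         j=l
--         cost += 1
--         return output_alignment(D,i,j,s,t,cost)
--     else:
--         i=k
--         j=l
--         if s[i] != t[j]:
--             cost += 1
--         return output_alignment(D,i,j,s,t,cost)
-- ===== SOURCE B (Python) =====
-- def output_alignment(D, i, j, s, t, cost):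
--     while not (i == 0 and j == 0):
--         k = max(i - 1, 0)
--         l = max(j - 1, 0)
--         # pick the move the way back_track does: first strict minimum below 100
--         cand = [D[k, l], D[i, l], D[k, j]]
--         best, m = 100, 0
--         for idx, v in enumerate(cand):
--             if v < best:
--                 best, m = v, idx
--         move = [(k, l), (i, l), (k, j)][m]
--         if move == (k, j):
--             i = k
--             cost += 1
--         elif move == (i, l):
--             j = l
--             cost += 1
--         else:
--             i, j = k, l
--             if s[i] != t[j]:
--                 cost += 1
--     return cost
-- ===== Notes on version B (the rewrite author's own statement) =====
-- stated objective: simpler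
-- what changed: Replaces A's tail recursion that calls the back_track helper twice per step with a single iterative while-loop over (i, j, cost) that computes the move once inline (enumerate scan + move table) and branches exactly as A does.
import Mathlib
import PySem

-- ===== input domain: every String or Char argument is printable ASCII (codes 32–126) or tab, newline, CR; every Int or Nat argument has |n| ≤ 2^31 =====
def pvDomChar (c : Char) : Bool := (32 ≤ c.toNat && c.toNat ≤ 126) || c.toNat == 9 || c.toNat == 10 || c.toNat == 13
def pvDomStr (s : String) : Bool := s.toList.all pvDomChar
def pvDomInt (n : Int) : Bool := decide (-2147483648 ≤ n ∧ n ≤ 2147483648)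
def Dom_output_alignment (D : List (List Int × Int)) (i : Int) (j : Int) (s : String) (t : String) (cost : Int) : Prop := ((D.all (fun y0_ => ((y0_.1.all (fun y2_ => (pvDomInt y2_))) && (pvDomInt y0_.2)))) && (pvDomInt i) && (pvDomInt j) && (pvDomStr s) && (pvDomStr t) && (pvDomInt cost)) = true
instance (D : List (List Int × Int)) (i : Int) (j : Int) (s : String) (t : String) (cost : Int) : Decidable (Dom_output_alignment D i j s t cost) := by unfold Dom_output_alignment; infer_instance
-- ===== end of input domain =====

-- B replaces A's double-call tail recursion by a single-pass iterative loop over the same (i, j, cost)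
-- state (objective: simpler).  Equivalence is about the RETURN value; neither program mutates its arguments.

-- ===== PORT A =====
-- D[a,b]: tuple-keyed dict lookup; Pre_ guarantees the key is present (Python's KeyError is excluded there)
def pvDGet (D : List (List Int × Int)) (a b : Int) : Int :=
  (PySem.Dict.get? (PySem.Dict.mk D) [a, b]).getD 0

def back_track (D : List (List Int × Int)) (i j : Int) : Int × Int :=
  let k := i - 1
  let l := j - 1
  let k := if k < 0 then 0 else k
  let l := if l < 0 then 0 else l
  let arr := [pvDGet D k l, pvDGet D i l, pvDGet D k j]
  let st := (List.range arr.length).foldl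
    (fun (st : Int × Nat) m => if arr.getD m 0 < st.1 then (arr.getD m 0, m) else st) (100, 0)
  if st.2 == 0 then (k, l)
  else if st.2 == 2 then (k, j)
  else (i, l)

-- A's recursion; fuel only makes the function total (under Pre_ the loop takes at most i+j steps,
-- so the fuel below never runs out on admitted inputs)
def output_alignment_go (D : List (List Int × Int)) (fuel : Nat) (i j : Int) (s t : String) (cost : Int) : Int :=
  match fuel with
  | 0 => cost
  | fuel + 1 =>
    let k := if i - 1 < 0 then 0 else i - 1
    let l := if j - 1 < 0 then 0 else j - 1
    if i == 0 && j == 0 then cost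
    else if back_track D i j == (k, j) then
      output_alignment_go D fuel k j s t (cost + 1)
    else if back_track D i j == (i, l) then
      output_alignment_go D fuel i l s t (cost + 1)
    else
      -- s[i] != t[j] with the new i=k, j=l; Pre_ keeps both indices in range (IndexError excluded)
      let cost := if PySem.Str.pyGet? s k ≠ PySem.Str.pyGet? t l then cost + 1 else cost
      output_alignment_go D fuel k l s t cost

def output_alignment (D : List (List Int × Int)) (i : Int) (j : Int) (s : String) (t : String) (cost : Int) : Int :=
  output_alignment_go D (i.toNat + j.toNat + 1) i j s t cost

-- ===== PORT B =====
-- Source B's while-loop, transliterated as a tail-recursive loop on the same fuel bound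
def output_alignment_alt_go (D : List (List Int × Int)) (fuel : Nat) (i j : Int) (s t : String) (cost : Int) : Int :=
  match fuel with
  | 0 => cost
  | fuel + 1 =>
    if i == 0 && j == 0 then cost
    else
      let k := max (i - 1) 0
      let l := max (j - 1) 0
      let cand := [(PySem.Dict.get? (PySem.Dict.mk D) [k, l]).getD 0,
                   (PySem.Dict.get? (PySem.Dict.mk D) [i, l]).getD 0,
                   (PySem.Dict.get? (PySem.Dict.mk D) [k, j]).getD 0]
      let bm := (PySem.List.enumerate cand).foldl
        (fun (st : Int × Int) p => if p.2 < st.1 then (p.2, p.1) else st) (100, 0)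
      let move := (PySem.List.pyGet? [(k, l), (i, l), (k, j)] bm.2).getD (k, l)
      if move == (k, j) then output_alignment_alt_go D fuel k j s t (cost + 1)
      else if move == (i, l) then output_alignment_alt_go D fuel i l s t (cost + 1)
      else output_alignment_alt_go D fuel k l s t
        (cost + if PySem.Str.pyGet? s k ≠ PySem.Str.pyGet? t l then 1 else 0)

def output_alignment_alt (D : List (List Int × Int)) (i : Int) (j : Int) (s : String) (t : String) (cost : Int) : Int :=
  output_alignment_alt_go D (i.toNat + j.toNat + 1) i j s t cost

-- ===== PRECONDITION & SPEC =====
-- Pre_ admits the inputs on which Python A returns: i, j ≥ 0, every cell (a,b) with a ≤ i, b ≤ j present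
-- in D (else KeyError), both strings long enough for the indices the walk uses (else IndexError), and the
-- clamped border cells non-decreasing below the 100 sentinel so the walk cannot get stuck on row/column 0
-- (else infinite recursion, i.e. RecursionError).  The grid/border conditions are conservative: A may also
-- happen to return on inputs where a missing or decreasing cell is simply never visited by its walk.
def Pre_output_alignment (D : List (List Int × Int)) (i : Int) (j : Int) (s : String) (t : String) (cost : Int) : Prop :=
  (i = 0 ∧ j = 0) ∨      -- A returns cost at once, touching neither D nor the strings
  (0 ≤ i ∧ 0 ≤ j ∧
  -- redundant bounds (implied by the key-presence conjunct below, which needs (i+1)*(j+1)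
  -- distinct keys among D's entries); stated first so the decision procedure is fast
  i < (D.length : Int) ∧ j < (D.length : Int) ∧
  (∀ a ∈ List.range (i.toNat + 1), ∀ b ∈ List.range (j.toNat + 1),
     (PySem.Dict.get? (PySem.Dict.mk D) [(a : Int), (b : Int)]).isSome = true) ∧
  (∀ b ∈ List.range j.toNat,
     min ((PySem.Dict.get? (PySem.Dict.mk D) [0, (b : Int)]).getD 0) 100
       ≤ (PySem.Dict.get? (PySem.Dict.mk D) [0, (b : Int) + 1]).getD 0) ∧
  (∀ a ∈ List.range i.toNat,
     min ((PySem.Dict.get? (PySem.Dict.mk D) [(a : Int), 0]).getD 0) 100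
       ≤ (PySem.Dict.get? (PySem.Dict.mk D) [(a : Int) + 1, 0]).getD 0) ∧
  max i 1 ≤ PySem.Str.len s ∧ max j 1 ≤ PySem.Str.len t)

instance (D : List (List Int × Int)) (i : Int) (j : Int) (s : String) (t : String) (cost : Int) : Decidable (Pre_output_alignment D i j s t cost) := by unfold Pre_output_alignment; infer_instance

def pvWitness_output_alignment : (List (List Int × Int)) × Int × Int × String × String × Int :=
  ([([0, 0], 0), ([0, 1], 1), ([1, 0], 1), ([1, 1], 0)], 1, 1, "a", "b", 0)

def Spec_output_alignment (D : List (List Int × Int)) (i : Int) (j : Int) (s : String) (t : String) (cost : Int) (out : Int) : Prop := out = output_alignment_alt D i j s t cost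
instance (D : List (List Int × Int)) (i : Int) (j : Int) (s : String) (t : String) (cost : Int) (out : Int) : Decidable (Spec_output_alignment D i j s t cost out) := by unfold Spec_output_alignment; infer_instance

-- ===== CLAIM (what is proved, stated in full; the proofs are below) =====
def Claim_equal_output_alignment : Prop := ∀ (D : List (List Int × Int)) (i : Int) (j : Int) (s : String) (t : String) (cost : Int), Dom_output_alignment D i j s t cost → Pre_output_alignment D i j s t cost → Spec_output_alignment D i j s t cost (output_alignment D i j s t cost)

-- ===== LEMMAS AND PROOFS =====

theorem clamp_eq_max (x : Int) : (if x < 0 then 0 else x) = max x 0 := by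
  split <;> omega

-- the two loop bodies agree step for step
theorem ite_add_one (c : Prop) [Decidable c] (cost : Int) :
    (if c then cost + 1 else cost) = cost + if c then 1 else 0 := by
  split <;> ring

theorem sel_eq (k l i j x y z : Int) :
    (PySem.List.pyGet? [(k, l), (i, l), (k, j)]
       ((PySem.List.enumerate [x, y, z]).foldl
         (fun (st : Int × Int) p => if p.2 < st.1 then (p.2, p.1) else st) (100, 0)).2).getD (k, l)
    = (let arr := [x, y, z]
       let st := (List.range arr.length).foldl
         (fun (st : Int × Nat) m => if arr.getD m 0 < st.1 then (arr.getD m 0, m) else st) (100, 0)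
       if st.2 == 0 then (k, l) else if st.2 == 2 then (k, j) else (i, l)) := by
  simp only [PySem.List.enumerate, List.length_cons, List.length_nil, List.range_succ,
    List.range_zero, List.nil_append, List.cons_append, List.foldl_cons, List.foldl_nil,
    List.getD, List.getElem?_cons_zero, List.getElem?_cons_succ, Option.getD_some]
  split_ifs <;> simp_all [PySem.List.pyGet?, PySem.List.pyIdx?]

theorem move_eq_back_track (D : List (List Int × Int)) (i j : Int) :
    (PySem.List.pyGet?
       [(max (i - 1) 0, max (j - 1) 0), (i, max (j - 1) 0), (max (i - 1) 0, j)]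
       ((PySem.List.enumerate
           [(PySem.Dict.get? (PySem.Dict.mk D) [max (i - 1) 0, max (j - 1) 0]).getD 0,
            (PySem.Dict.get? (PySem.Dict.mk D) [i, max (j - 1) 0]).getD 0,
            (PySem.Dict.get? (PySem.Dict.mk D) [max (i - 1) 0, j]).getD 0]).foldl
         (fun (st : Int × Int) p => if p.2 < st.1 then (p.2, p.1) else st) (100, 0)).2).getD
      (max (i - 1) 0, max (j - 1) 0)
    = back_track D i j := by
  rw [sel_eq]
  simp only [back_track, pvDGet, clamp_eq_max]

theorem go_eq (D : List (List Int × Int)) (fuel : Nat) :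
    ∀ (i j : Int) (s t : String) (cost : Int),
      output_alignment_go D fuel i j s t cost = output_alignment_alt_go D fuel i j s t cost := by
  induction fuel with
  | zero => intro i j s t cost; rfl
  | succ f ih =>
    intro i j s t cost
    show output_alignment_go D (f + 1) i j s t cost = output_alignment_alt_go D (f + 1) i j s t cost
    simp only [output_alignment_go, output_alignment_alt_go, clamp_eq_max, ih,
      move_eq_back_track, ite_add_one]

theorem output_alignment_spec : Claim_equal_output_alignment := by
  intro D i j s t cost _ _
  show output_alignment D i j s t cost = output_alignment_alt D i j s t cost
  simp only [output_alignment, output_alignment_alt, go_eq]
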